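-- pv_equiv track=rewrite | github.com/justjacobrosario/BS_Computer_Science_UPD_Repo | 1st Year 1st Sem/python test drive/lec19_algorithms/lec19_scratch.py | my_subarray
-- ===== SOURCE A (Python) =====
-- def my_subarray(seq, k):
--     res = []
--     for start in range(len(seq)):
--         for end in range(start, len(seq)):
--             if start == end:
--                 subarray = [seq[start]]
--             else:
--                 subarray = seq[start:end+1]
--             if len(subarray) == k:
--                 res.append(sum(subarray))
--     return res
-- ===== SOURCE B (Python) =====
-- def my_subarray(seq, k):
--     # Sliding window: one running sum over the length-k windows, O(n) instead of O(n^2 * k).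
--     n = len(seq)
--     if k < 1 or k > n:
--         return []
--     s = sum(seq[:k])
--     res = [s]
--     for i in range(k, n):
--         s += seq[i] - seq[i - k]
--         res.append(s)
--     return res
-- ===== Notes on version B (the rewrite author's own statement) =====
-- stated objective: faster
-- what changed: Replaces the nested start/end scan that slices and re-sums every subarray with a single sliding-window pass maintaining one running window sum.
import Mathlib
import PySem

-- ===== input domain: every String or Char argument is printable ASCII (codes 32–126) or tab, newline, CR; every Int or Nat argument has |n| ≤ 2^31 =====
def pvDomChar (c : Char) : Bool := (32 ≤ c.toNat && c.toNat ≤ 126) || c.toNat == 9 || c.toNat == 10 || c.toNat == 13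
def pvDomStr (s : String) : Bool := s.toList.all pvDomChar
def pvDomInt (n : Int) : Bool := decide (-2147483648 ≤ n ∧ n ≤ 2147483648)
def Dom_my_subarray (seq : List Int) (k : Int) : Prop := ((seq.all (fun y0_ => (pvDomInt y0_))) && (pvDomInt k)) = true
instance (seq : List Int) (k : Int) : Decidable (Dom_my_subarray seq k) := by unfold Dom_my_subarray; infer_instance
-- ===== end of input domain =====

-- B replaces A's nested start/end scan (slice + re-sum per subarray) with one sliding-window pass keeping a running window sum.


-- ===== PORT A =====
-- 'subarray' of the Python: [seq[start]] when start == end, else seq[start:end+1]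
def pvSubA (seq : List Int) (start e : Int) : List Int :=
  if start == e then [(PySem.List.pyGet? seq start).getD 0]   -- index always in range when this runs
  else PySem.List.slice seq (some start) (some (e + 1))

def my_subarray (seq : List Int) (k : Int) : List Int :=
  (PySem.List.pyRange 0 (seq.length : Int) 1).foldl (fun res start =>
    (PySem.List.pyRange start (seq.length : Int) 1).foldl (fun res e =>
      if (((pvSubA seq start e).length : Int) == k) then res ++ [(pvSubA seq start e).sum] else res)
      res) []

-- ===== PORT B =====
def my_subarray_alt (seq : List Int) (k : Int) : List Int :=
  if k < 1 ∨ (seq.length : Int) < k then []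
  else
    let s0 := (PySem.List.slice seq none (some k)).sum
    ((PySem.List.pyRange k (seq.length : Int) 1).foldl
      (fun (p : List Int × Int) i =>
        let s := p.2 + (PySem.List.pyGet? seq i).getD 0 - (PySem.List.pyGet? seq (i - k)).getD 0
        (p.1 ++ [s], s))
      ([s0], s0)).1

-- ===== PRECONDITION & SPEC =====
def Spec_my_subarray (seq : List Int) (k : Int) (out : List Int) : Prop := out = my_subarray_alt seq k
instance (seq : List Int) (k : Int) (out : List Int) : Decidable (Spec_my_subarray seq k out) := by unfold Spec_my_subarray; infer_instance

-- ===== CLAIM (what is proved, stated in full; the proofs are below) =====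
def Claim_equal_my_subarray : Prop := ∀ (seq : List Int) (k : Int), Dom_my_subarray seq k → Spec_my_subarray seq k (my_subarray seq k)

-- ===== LEMMAS AND PROOFS =====

-- sum of the length-kn window of seq starting at i
def pvWin (seq : List Int) (i kn : Nat) : Int := ((seq.drop i).take kn).sum

theorem pvWin_succ (seq : List Int) (kn j : Nat) (hj : j + kn < seq.length) :
    pvWin seq (j + 1) kn = pvWin seq j kn + seq.getD (j + kn) 0 - seq.getD j 0 := by
  have hjL : j < seq.length := by omega
  have e1 : (seq.drop j).take (kn + 1) = seq.getD j 0 :: (seq.drop (j + 1)).take kn := by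
    rw [List.drop_eq_getElem_cons hjL, List.getD_eq_getElem _ _ hjL, List.take_succ_cons]
  have e2 : (seq.drop j).take (kn + 1) = (seq.drop j).take kn ++ [seq.getD (j + kn) 0] := by
    rw [List.take_add_one, List.getElem?_drop, List.getElem?_eq_getElem (by omega),
      List.getD_eq_getElem _ _ (by omega)]
    rfl
  have := congrArg List.sum (e1.symm.trans e2)
  simp only [List.sum_cons, List.sum_append, List.sum_nil] at this
  unfold pvWin
  omega

theorem len_pvSubA (seq : List Int) (s j : Nat) (h : s + j < seq.length) :
    (((pvSubA seq (s : Int) ((s : Int) + (j : Int))).length : Int)) = (j : Int) + 1 := by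
  unfold pvSubA
  by_cases hj : j = 0
  · subst hj; simp
  · have hne : (((s : Int)) == ((s : Int) + (j : Int))) = false := by
      simp only [beq_eq_false_iff_ne, ne_eq]
      omega
    rw [hne, if_neg (by simp)]
    rw [PySem.List.slice_toNat _ (by omega) (by omega)]
    simp only [List.length_take, List.length_drop]
    omega

theorem sum_pvSubA (seq : List Int) (s kn : Nat) (h1 : 1 ≤ kn) (h2 : s + kn ≤ seq.length) :
    (pvSubA seq (s : Int) ((s : Int) + ((kn : Int) - 1))).sum = pvWin seq s kn := by
  have hsL : s < seq.length := by omega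
  unfold pvSubA
  by_cases hk : kn = 1
  · subst hk
    rw [if_pos (by simp)]
    have hget : PySem.List.pyGet? seq (s : Int) = seq[s]? := by simp [pysem]
    rw [hget, List.getElem?_eq_getElem hsL]
    unfold pvWin
    rw [List.drop_eq_getElem_cons hsL, List.take_succ_cons, List.take_zero]
    simp
  · have hne : (((s : Int)) == ((s : Int) + ((kn : Int) - 1))) = false := by
      simp only [beq_eq_false_iff_ne, ne_eq]
      omega
    rw [hne, if_neg (by simp)]
    rw [PySem.List.slice_toNat _ (by omega) (by omega)]
    have harg : (((s : Int) + ((kn : Int) - 1) + 1).toNat - ((s : Int)).toNat) = kn := by omega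
    rw [harg]
    have hs' : ((s : Int)).toNat = s := by omega
    rw [hs']
    rfl

theorem filter_beq_range (t m : Nat) :
    (List.range t).filter (fun j => j == m) = if m < t then [m] else [] := by
  induction t with
  | zero => simp
  | succ t ih =>
    rw [List.range_succ, List.filter_append, ih]
    by_cases h : m = t
    · subst h
      rw [if_neg (by omega), if_pos (by omega)]
      simp
    · by_cases h2 : m < t
      · rw [if_pos h2, if_pos (by omega)]
        simp [Ne.symm h]
      · rw [if_neg h2, if_neg (by omega)]
        simp [Ne.symm h]

theorem flatMap_range_if (W : Nat → Int) (t : Nat) :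
    ∀ L : Nat, (List.range L).flatMap (fun s => if s < t then [W s] else [])
      = (List.range (min t L)).map W := by
  intro L
  induction L with
  | zero => simp
  | succ L ih =>
    rw [List.range_succ, List.flatMap_append, ih]
    by_cases h : L < t
    · rw [Nat.min_eq_right (by omega), Nat.min_eq_right (by omega), List.range_succ]
      simp [h]
    · rw [Nat.min_eq_left (by omega), Nat.min_eq_left (by omega)]
      simp [h]

theorem inner_char (seq : List Int) (k : Int) (s : Nat) (hs : s < seq.length) :
    ((PySem.List.pyRange (s : Int) (seq.length : Int) 1).filter
        (fun e => (((pvSubA seq (s : Int) e).length : Int) == k))).map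
      (fun e => (pvSubA seq (s : Int) e).sum)
    = if 1 ≤ k ∧ (s : Int) + k ≤ (seq.length : Int) then [pvWin seq s k.toNat] else [] := by
  have hL : (((seq.length : Int)) - (s : Int)).toNat = seq.length - s := by omega
  rw [PySem.List.pyRange_one, hL, List.filter_map, List.map_map]
  have hq : ∀ j ∈ List.range (seq.length - s),
      ((fun e => (((pvSubA seq (s : Int) e).length : Int) == k)) ∘ (fun j : Nat => (s : Int) + (j : Int))) j
        = (((j : Int) + 1) == k) := by
    intro j hj
    have hjlt : s + j < seq.length := by
      have := List.mem_range.mp hj; omega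
    simp only [Function.comp_apply]
    rw [len_pvSubA seq s j hjlt]
  rw [List.filter_congr hq]
  by_cases hk1 : 1 ≤ k
  · have hq2 : ∀ j ∈ List.range (seq.length - s),
        ((((j : Int) + 1) == k)) = (j == (k - 1).toNat) := by
      intro j _
      rw [Bool.eq_iff_iff]
      simp only [beq_iff_eq]
      omega
    rw [List.filter_congr hq2, filter_beq_range]
    by_cases hlt : (k - 1).toNat < seq.length - s
    · rw [if_pos hlt, if_pos (by constructor <;> omega)]
      simp only [List.map_cons, List.map_nil, Function.comp_apply]
      have harg : (s : Int) + (((k - 1).toNat : Nat) : Int) = (s : Int) + ((k.toNat : Int) - 1) := by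
        omega
      rw [harg, sum_pvSubA seq s k.toNat (by omega) (by omega)]
    · rw [if_neg hlt, if_neg (by omega)]
      simp
  · have hq2 : ∀ j ∈ List.range (seq.length - s), ((((j : Int) + 1) == k)) = false := by
      intro j _
      simp only [beq_eq_false_iff_ne, ne_eq]
      omega
    rw [List.filter_congr hq2, List.filter_false, if_neg (by omega)]
    simp

theorem A_char (seq : List Int) (k : Int) :
    my_subarray seq k
      = (List.range seq.length).flatMap
          (fun s : Nat => if 1 ≤ k ∧ (s : Int) + k ≤ (seq.length : Int) then [pvWin seq s k.toNat] else []) := by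
  unfold my_subarray
  simp only [PySem.List.foldl_append_if]
  have h : ∀ (acc : List Int) (x : Int), x ∈ PySem.List.pyRange 0 (seq.length : Int) 1 →
      acc ++ ((PySem.List.pyRange x (seq.length : Int) 1).filter
          (fun e => (((pvSubA seq x e).length : Int) == k))).map (fun e => (pvSubA seq x e).sum)
        = acc ++ (if 1 ≤ k ∧ x + k ≤ (seq.length : Int) then [pvWin seq x.toNat k.toNat] else []) := by
    intro acc x hx
    have hx' := (PySem.List.mem_pyRange_one).mp hx
    have hxx : ((x.toNat : Nat) : Int) = x := by omega
    congr 1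
    rw [← hxx]
    exact inner_char seq k x.toNat (by omega)
  rw [PySem.List.foldl_congr_mem (PySem.List.pyRange 0 (seq.length : Int) 1) _
      (fun res start => res ++ (if 1 ≤ k ∧ start + k ≤ (seq.length : Int)
        then [pvWin seq start.toNat k.toNat] else [])) [] h,
    PySem.List.foldl_append_eq_flatMap, PySem.List.pyRange_one]
  simp only [sub_zero, Int.toNat_natCast, zero_add, List.flatMap_map, List.nil_append]

theorem B_loop (seq : List Int) (kn : Nat) :
    ∀ (m : Nat), kn ≤ m → m ≤ seq.length →
    (PySem.List.pyRange ((kn : Nat) : Int) ((m : Nat) : Int) 1).foldl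
      (fun (p : List Int × Int) i =>
        let s := p.2 + (PySem.List.pyGet? seq i).getD 0
          - (PySem.List.pyGet? seq (i - ((kn : Nat) : Int))).getD 0
        (p.1 ++ [s], s))
      ([pvWin seq 0 kn], pvWin seq 0 kn)
    = ((List.range (m - kn + 1)).map (fun i => pvWin seq i kn), pvWin seq (m - kn) kn) := by
  intro m hm
  induction m, hm using Nat.le_induction with
  | base =>
    intro _
    rw [PySem.List.pyRange_one_eq_nil (le_refl _)]
    simp
  | succ m hm ih =>
    intro hL
    have ih' := ih (by omega)
    have hcast : ((m + 1 : Nat) : Int) = ((m : Nat) : Int) + 1 := by push_cast; ring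
    rw [hcast, PySem.List.pyRange_one_succ_right (by exact_mod_cast hm), List.foldl_append, ih']
    simp only [List.foldl_cons, List.foldl_nil]
    have g1 : (PySem.List.pyGet? seq ((m : Nat) : Int)).getD 0 = seq.getD m 0 := by
      simp [pysem, List.getD_eq_getElem?_getD]
    have hc2 : ((m : Nat) : Int) - ((kn : Nat) : Int) = ((m - kn : Nat) : Int) := by omega
    have g2 : (PySem.List.pyGet? seq (((m : Nat) : Int) - ((kn : Nat) : Int))).getD 0
        = seq.getD (m - kn) 0 := by
      rw [hc2]; simp [pysem, List.getD_eq_getElem?_getD]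
    simp only [g1, g2]
    have hw : pvWin seq (m - kn) kn + seq.getD m 0 - seq.getD (m - kn) 0
        = pvWin seq (m - kn + 1) kn := by
      have := pvWin_succ seq kn (m - kn) (by omega)
      have hmm : m - kn + kn = m := by omega
      rw [hmm] at this
      omega
    have hmk : m + 1 - kn + 1 = (m - kn + 1) + 1 := by omega
    have hmk2 : m + 1 - kn = m - kn + 1 := by omega
    rw [hw, hmk, hmk2]
    conv_rhs => rw [List.range_succ]
    simp

theorem B_char (seq : List Int) (k : Int) (h1 : 1 ≤ k) (h2 : k ≤ (seq.length : Int)) :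
    my_subarray_alt seq k = (List.range (seq.length - k.toNat + 1)).map (fun i => pvWin seq i k.toNat) := by
  obtain ⟨kn, rfl⟩ : ∃ kn : Nat, k = (kn : Int) := ⟨k.toNat, by omega⟩
  unfold my_subarray_alt
  rw [if_neg (by omega)]
  have hX : (PySem.List.slice seq none (some ((kn : Nat) : Int))).sum = pvWin seq 0 kn := by
    rw [PySem.List.slice_to _ (by omega)]
    unfold pvWin
    rw [List.drop_zero, Int.toNat_natCast]
  simp only [hX, Int.toNat_natCast]
  rw [B_loop seq kn seq.length (by omega) (le_refl _)]

-- ===== VERDICT (by name: the statement is the Claim_ definition above) =====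
theorem my_subarray_spec : Claim_equal_my_subarray := by
  intro seq k _
  unfold Spec_my_subarray
  by_cases hk : 1 ≤ k ∧ k ≤ (seq.length : Int)
  · rw [A_char, B_char seq k hk.1 hk.2]
    have hc : ∀ s : Nat, (if 1 ≤ k ∧ (s : Int) + k ≤ (seq.length : Int) then [pvWin seq s k.toNat] else [])
        = (if s < seq.length - k.toNat + 1 then [pvWin seq s k.toNat] else []) := by
      intro s; exact if_congr (by omega) rfl rfl
    simp only [hc, flatMap_range_if]
    obtain ⟨hk1, hk2⟩ := hk
    rw [Nat.min_eq_left (by omega)]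
  · have hA : my_subarray seq k = [] := by
      rw [A_char]
      have hc : ∀ s : Nat, (if 1 ≤ k ∧ (s : Int) + k ≤ (seq.length : Int) then [pvWin seq s k.toNat] else [])
          = ([] : List Int) := by
        intro s; exact if_neg (by omega)
      simp [hc]
    have hB : my_subarray_alt seq k = [] := by
      unfold my_subarray_alt
      rw [if_pos (by omega)]
    rw [hA, hB]
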